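-- pv_equiv track=rewrite | github.com/JR-espacial/BERTPlagarismDetectionCNN | embedding.py | word_dictionary
-- ===== SOURCE A (Python) =====
-- def word_dictionary(text1_words, text2_words):
--   unique = {}
--   for word in text1_words:
--     if unique.get(word) is None:
--       unique[word] = [0, 0]
--       unique[word][0] += 1
--     else:
--       unique[word][0] += 1
--   for word in text2_words:
--     if unique.get(word) is None:
--       unique[word] = [0, 0]
--       unique[word][1] += 1
--     else:
--       unique[word][1] += 1
--   return unique
-- ===== SOURCE B (Python) =====
-- def word_dictionary(text1_words, text2_words):
--     # tabulate: two plain frequency tables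
--     c1 = {}
--     for w in text1_words:
--         c1[w] = c1.get(w, 0) + 1
--     c2 = {}
--     for w in text2_words:
--         c2[w] = c2.get(w, 0) + 1
--     # merge: words of text1 first, then words only in text2
--     result = {w: [n, c2.get(w, 0)] for w, n in c1.items()}
--     for w, n in c2.items():
--         if w not in result:
--             result[w] = [0, n]
--     return result
-- ===== Notes on version B (the rewrite author's own statement) =====
-- stated objective: idiomatic
-- what changed: Replaces A's two interleaved insert-then-mutate-a-[0,0]-cell loops by a tabulate-then-merge decomposition: two plain int frequency tables are built first, then the result dict is assembled in one comprehension over table 1 plus a pass adding text2-only words.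
import Mathlib
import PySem

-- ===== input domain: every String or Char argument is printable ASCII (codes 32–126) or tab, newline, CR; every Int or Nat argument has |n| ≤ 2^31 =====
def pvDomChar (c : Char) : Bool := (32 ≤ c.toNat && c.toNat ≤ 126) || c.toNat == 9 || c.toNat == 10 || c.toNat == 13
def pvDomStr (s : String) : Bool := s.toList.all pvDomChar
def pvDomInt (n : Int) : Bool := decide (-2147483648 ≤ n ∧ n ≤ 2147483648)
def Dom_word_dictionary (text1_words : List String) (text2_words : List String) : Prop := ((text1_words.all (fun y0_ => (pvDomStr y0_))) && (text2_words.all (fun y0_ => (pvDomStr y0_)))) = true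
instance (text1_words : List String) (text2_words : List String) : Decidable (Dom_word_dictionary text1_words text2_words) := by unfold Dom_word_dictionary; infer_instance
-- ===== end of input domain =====

-- B replaces A's interleaved insert-then-mutate counting loops by a tabulate-then-merge
-- decomposition (two int frequency tables, then one merge pass); same cost, different shape.

-- ===== PORT A =====
-- unique[word][0] += 1  on the two-element list value
def pvBump0 (v : List Int) : List Int :=
  match v with
  | a :: r => (a + 1) :: r
  | [] => []
-- unique[word][1] += 1
def pvBump1 (v : List Int) : List Int :=
  match v with
  | a :: b :: r => a :: (b + 1) :: r
  | v => v

def word_dictionary (text1_words : List String) (text2_words : List String) : List (String × List Int) :=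
  let unique : PySem.Dict String (List Int) := PySem.Dict.empty
  let unique := text1_words.foldl (fun d word =>
    if d.get? word = none then
      (d.insert word [0, 0]).modify word [0, 0] pvBump0
    else
      d.modify word [0, 0] pvBump0) unique
  let unique := text2_words.foldl (fun d word =>
    if d.get? word = none then
      (d.insert word [0, 0]).modify word [0, 0] pvBump1
    else
      d.modify word [0, 0] pvBump1) unique
  unique.items

-- ===== PORT B =====
def word_dictionary_alt (text1_words : List String) (text2_words : List String) : List (String × List Int) :=
  let c1 : PySem.Dict String Int :=
    text1_words.foldl (fun d w => d.insert w (d.getD w 0 + 1)) PySem.Dict.empty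
  let c2 : PySem.Dict String Int :=
    text2_words.foldl (fun d w => d.insert w (d.getD w 0 + 1)) PySem.Dict.empty
  let result : PySem.Dict String (List Int) :=
    c1.items.foldl (fun d p => d.insert p.1 [p.2, c2.getD p.1 0]) PySem.Dict.empty
  let result :=
    c2.items.foldl (fun d p => if d.contains p.1 then d else d.insert p.1 [0, p.2]) result
  result.items

-- ===== PRECONDITION & SPEC =====
def Spec_word_dictionary (text1_words : List String) (text2_words : List String) (out : List (String × List Int)) : Prop := out = word_dictionary_alt text1_words text2_words
instance (text1_words : List String) (text2_words : List String) (out : List (String × List Int)) : Decidable (Spec_word_dictionary text1_words text2_words out) := by unfold Spec_word_dictionary; infer_instance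

-- ===== CLAIM (what is proved, stated in full; the proofs are below) =====
def Claim_equal_word_dictionary : Prop := ∀ (text1_words : List String) (text2_words : List String), Dom_word_dictionary text1_words text2_words → Spec_word_dictionary text1_words text2_words (word_dictionary text1_words text2_words)

-- ===== LEMMAS AND PROOFS =====

-- the common normal form both programs compute
def pvSpecList (t1 t2 : List String) : List (String × List Int) :=
  (PySem.Set.ofList (t1 ++ t2)).map (fun k => (k, [(t1.count k : Int), (t2.count k : Int)]))

def pvAddFst (n : Int) (v : List Int) : List Int :=
  match v with
  | a :: r => (a + n) :: r
  | [] => []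

def pvAddSnd (n : Int) (v : List Int) : List Int :=
  match v with
  | a :: b :: r => a :: (b + n) :: r
  | v => v

-- A's loop body is an insert of the bumped current value
theorem stepA0_eq (d : PySem.Dict String (List Int)) (w : String) :
    (if d.get? w = none then (d.insert w [0, 0]).modify w [0, 0] pvBump0
     else d.modify w [0, 0] pvBump0)
    = d.insert w (pvBump0 (d.getD w [0, 0])) := by
  by_cases h : d.get? w = none
  · simp [h, PySem.Dict.modify, PySem.Dict.getD_insert_self, PySem.Dict.insert_insert_self,
      PySem.Dict.getD_of_get?_eq_none d _ h]
  · simp [h, PySem.Dict.modify]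

theorem stepA1_eq (d : PySem.Dict String (List Int)) (w : String) :
    (if d.get? w = none then (d.insert w [0, 0]).modify w [0, 0] pvBump1
     else d.modify w [0, 0] pvBump1)
    = d.insert w (pvBump1 (d.getD w [0, 0])) := by
  by_cases h : d.get? w = none
  · simp [h, PySem.Dict.modify, PySem.Dict.getD_insert_self, PySem.Dict.insert_insert_self,
      PySem.Dict.getD_of_get?_eq_none d _ h]
  · simp [h, PySem.Dict.modify]

theorem pvAddFst_bump0 (n : Int) (v : List Int) :
    pvAddFst n (pvBump0 v) = pvAddFst (n + 1) v := by
  cases v <;> simp [pvAddFst, pvBump0] <;> ring_nf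

theorem pvAddSnd_bump1 (n : Int) (v : List Int) :
    pvAddSnd n (pvBump1 v) = pvAddSnd (n + 1) v := by
  cases v with
  | nil => simp [pvAddSnd, pvBump1]
  | cons a r => cases r <;> simp [pvAddSnd, pvBump1] <;> ring

theorem pvAddFst_zero (v : List Int) : pvAddFst 0 v = v := by
  cases v <;> simp [pvAddFst]

theorem pvAddSnd_zero (v : List Int) : pvAddSnd 0 v = v := by
  cases v with
  | nil => simp [pvAddSnd]
  | cons a r => cases r <;> simp [pvAddSnd]

theorem loop0_getD (l : List String) :
    ∀ (d : PySem.Dict String (List Int)) (k : String),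
      (l.foldl (fun (d : PySem.Dict String (List Int)) w => d.insert w (pvBump0 (d.getD w [0, 0]))) d).getD k [0, 0]
      = pvAddFst (l.count k : Int) (d.getD k [0, 0]) := by
  induction l with
  | nil => intro d k; simp [pvAddFst_zero]
  | cons w l ih =>
    intro d k
    rw [List.foldl_cons, ih]
    by_cases hk : k = w
    · subst hk
      rw [PySem.Dict.getD_insert_self, pvAddFst_bump0, List.count_cons_self]
      norm_cast
    · rw [PySem.Dict.getD_insert_of_ne d _ _ hk]
      have hk' : ¬ (w = k) := fun h => hk h.symm
      simp [hk']

theorem loop1_getD (l : List String) :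
    ∀ (d : PySem.Dict String (List Int)) (k : String),
      (l.foldl (fun (d : PySem.Dict String (List Int)) w => d.insert w (pvBump1 (d.getD w [0, 0]))) d).getD k [0, 0]
      = pvAddSnd (l.count k : Int) (d.getD k [0, 0]) := by
  induction l with
  | nil => intro d k; simp [pvAddSnd_zero]
  | cons w l ih =>
    intro d k
    rw [List.foldl_cons, ih]
    by_cases hk : k = w
    · subst hk
      rw [PySem.Dict.getD_insert_self, pvAddSnd_bump1, List.count_cons_self]
      norm_cast
    · rw [PySem.Dict.getD_insert_of_ne d _ _ hk]
      have hk' : ¬ (w = k) := fun h => hk h.symm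
      simp [hk']

-- characterisation of A
theorem word_dictionary_eq_spec (t1 t2 : List String) :
    word_dictionary t1 t2 = pvSpecList t1 t2 := by
  unfold word_dictionary pvSpecList
  have h0 : (fun (d : PySem.Dict String (List Int)) (word : String) =>
      if d.get? word = none then (d.insert word [0, 0]).modify word [0, 0] pvBump0
      else d.modify word [0, 0] pvBump0)
      = fun d w => d.insert w (pvBump0 (d.getD w [0, 0])) := by
    funext d w; exact stepA0_eq d w
  have h1 : (fun (d : PySem.Dict String (List Int)) (word : String) =>
      if d.get? word = none then (d.insert word [0, 0]).modify word [0, 0] pvBump1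
      else d.modify word [0, 0] pvBump1)
      = fun d w => d.insert w (pvBump1 (d.getD w [0, 0])) := by
    funext d w; exact stepA1_eq d w
  simp only [h0, h1]
  have hk1 : (t1.foldl (fun (d : PySem.Dict String (List Int)) w => d.insert w (pvBump0 (d.getD w [0, 0])))
      (PySem.Dict.empty : PySem.Dict String (List Int))).keys = PySem.Set.ofList t1 := by
    rw [PySem.Dict.keys_foldl_insert t1 (fun (d : PySem.Dict String (List Int)) w => pvBump0 (d.getD w [0, 0])),
      PySem.Dict.keys_empty, PySem.Set.update_nil_left]
  have hk2 : (t2.foldl (fun (d : PySem.Dict String (List Int)) w => d.insert w (pvBump1 (d.getD w [0, 0])))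
      (t1.foldl (fun (d : PySem.Dict String (List Int)) w => d.insert w (pvBump0 (d.getD w [0, 0])))
      (PySem.Dict.empty : PySem.Dict String (List Int)))).keys
      = PySem.Set.ofList (t1 ++ t2) := by
    rw [PySem.Dict.keys_foldl_insert t2 (fun (d : PySem.Dict String (List Int)) w => pvBump1 (d.getD w [0, 0])), hk1,
      PySem.Set.ofList_append]
  have hnd : (t2.foldl (fun (d : PySem.Dict String (List Int)) w => d.insert w (pvBump1 (d.getD w [0, 0])))
      (t1.foldl (fun (d : PySem.Dict String (List Int)) w => d.insert w (pvBump0 (d.getD w [0, 0])))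
      (PySem.Dict.empty : PySem.Dict String (List Int)))).keys.Nodup := by
    rw [hk2]; exact PySem.Set.nodup_ofList _
  rw [PySem.Dict.items_eq_map_keys _ hnd [0, 0], hk2]
  apply List.map_congr_left
  intro k _
  rw [loop1_getD t2, loop0_getD t1, PySem.Dict.getD_empty]
  simp [pvAddFst, pvAddSnd]

-- conditional-insert loop over distinct keys appends exactly the new ones
theorem condInsert_items (l : List (String × Int)) :
    ∀ (d : PySem.Dict String (List Int)), (l.map Prod.fst).Nodup →
      (l.foldl (fun d p => if d.contains p.1 then d else d.insert p.1 [0, p.2]) d).items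
      = d.items ++ (l.filter (fun p => !d.contains p.1)).map (fun p => (p.1, ([0, p.2] : List Int))) := by
  induction l with
  | nil => intro d _; simp
  | cons q l ih =>
    intro d hnd
    have hnd' : (l.map Prod.fst).Nodup := (List.nodup_cons.mp hnd).2
    have hq : q.1 ∉ l.map Prod.fst := (List.nodup_cons.mp hnd).1
    rw [List.foldl_cons]
    by_cases h : d.contains q.1
    · rw [if_pos h, ih d hnd']
      simp [h]
    · rw [if_neg h, ih _ hnd']
      have hfc : l.filter (fun p => !(d.insert q.1 [0, q.2]).contains p.1)
          = l.filter (fun p => !d.contains p.1) := by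
        apply List.filter_congr
        intro p hp
        have hne : p.1 ≠ q.1 := by
          intro he; exact hq (he ▸ List.mem_map_of_mem hp)
        rw [PySem.Dict.contains_insert]
        simp [hne]
      rw [hfc, PySem.Dict.items_insert_of_not_contains d _ (by simpa using h)]
      simp [h]

-- ofList is the identity on a list that is already a set
theorem ofList_ofList (t : List String) :
    PySem.Set.ofList (PySem.Set.ofList t) = PySem.Set.ofList t := by
  rw [← PySem.Set.update_nil_left,
    PySem.Set.update_eq_append_of_disjoint _ _ (PySem.Set.nodup_ofList t) (by simp)]
  simp

-- characterisation of B
theorem word_dictionary_alt_eq_spec (t1 t2 : List String) :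
    word_dictionary_alt t1 t2 = pvSpecList t1 t2 := by
  unfold word_dictionary_alt pvSpecList
  simp only [PySem.Dict.foldl_insert_getD_add_one_eq_counter]
  -- the first merge loop: all keys fresh and distinct
  have hfresh : ∀ p ∈ (PySem.Dict.counter t1).items,
      (PySem.Dict.empty : PySem.Dict String (List Int)).contains p.1 = false := by
    intro p _; exact PySem.Dict.contains_empty _
  have hmapfst : ((PySem.Dict.counter t1).items.map Prod.fst) = (PySem.Dict.counter t1).keys := rfl
  have hnd1 : ((PySem.Dict.counter t1).items.map Prod.fst).Nodup := by
    rw [hmapfst]; exact PySem.Dict.nodup_keys_counter t1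
  have e1 : ((PySem.Dict.counter t1).items.foldl
      (fun d p => d.insert p.1 [p.2, (PySem.Dict.counter t2).getD p.1 0]) PySem.Dict.empty).items
      = [] ++ (PySem.Dict.counter t1).items.map
          (fun p => (p.1, ([p.2, (PySem.Dict.counter t2).getD p.1 0] : List Int))) :=
    PySem.Dict.items_foldl_insert_fresh (PySem.Dict.counter t1).items Prod.fst _ _ hfresh hnd1
  have hkeys1 : ((PySem.Dict.counter t1).items.foldl
      (fun d p => d.insert p.1 [p.2, (PySem.Dict.counter t2).getD p.1 0]) PySem.Dict.empty).keys
      = PySem.Set.ofList t1 := by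
    have := PySem.Dict.keys_foldl_insert_key (PySem.Dict.counter t1).items Prod.fst
      (fun (d : PySem.Dict String (List Int)) (p : String × Int) => ([p.2, (PySem.Dict.counter t2).getD p.1 0] : List Int))
      (PySem.Dict.empty : PySem.Dict String (List Int))
    rw [this, PySem.Dict.keys_empty, PySem.Set.update_nil_left, hmapfst,
      PySem.Dict.keys_counter, ofList_ofList]
  have hnd2 : ((PySem.Dict.counter t2).items.map Prod.fst).Nodup := by
    have : ((PySem.Dict.counter t2).items.map Prod.fst) = (PySem.Dict.counter t2).keys := rfl
    rw [this]; exact PySem.Dict.nodup_keys_counter t2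
  rw [condInsert_items (PySem.Dict.counter t2).items _ hnd2, e1, List.nil_append]
  -- rewrite counter items and split the spec list
  rw [PySem.Set.ofList_append, PySem.Set.update_eq_append_filter, List.map_append]
  congr 1
  · -- text1 part
    rw [PySem.Dict.items_counter, List.map_map]
    apply List.map_congr_left
    intro k _
    simp [PySem.Dict.getD_counter]
  · -- text2-only part
    rw [PySem.Dict.items_counter t2, List.filter_map, List.map_map]
    have hfc : (PySem.Set.ofList t2).filter
        ((fun p => !((PySem.Dict.counter t1).items.foldl
          (fun d p => d.insert p.1 [p.2, (PySem.Dict.counter t2).getD p.1 0])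
          PySem.Dict.empty).contains p.1) ∘ (fun k => (k, (List.count k t2 : Int))))
        = (PySem.Set.ofList t2).filter (fun y => !(PySem.Set.ofList t1).contains y) := by
      apply List.filter_congr
      intro k _
      simp only [Function.comp]
      rw [PySem.Dict.contains_eq_decide_mem_keys, hkeys1]
      congr 1
      simp [PySem.Set.contains, PySem.Set.mem_ofList]
    rw [hfc]
    apply List.map_congr_left
    intro k hk
    have hk1 : k ∉ t1 := by
      have := (List.mem_filter.mp hk).2
      simp only [Bool.not_eq_true'] at this
      intro hmem
      have : (PySem.Set.ofList t1).contains k = true := by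
        simp [PySem.Set.contains, PySem.Set.mem_ofList, hmem]
      simp_all
    simp [List.count_eq_zero.mpr hk1]

-- ===== VERDICT (by name: the statement is the Claim_ definition above) =====
theorem word_dictionary_spec : Claim_equal_word_dictionary := by
  intro t1 t2 _
  unfold Spec_word_dictionary
  rw [word_dictionary_eq_spec, word_dictionary_alt_eq_spec]
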